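-- pv_equiv track=rewrite | github.com/prodbartist/ai4pkm-vault | video-add-chapters/parse_highlight_annotations.py | merge_consecutive_highlights
-- ===== SOURCE A (Python) =====
-- def merge_consecutive_highlights(highlights: list, gap_threshold: int = 10) -> list:
--     """
--     Merge consecutive highlights that are close together.
--     Returns list of (start_seconds, end_seconds, merged_text) tuples.
--     """
--     if not highlights:
--         return []
--
--     merged = []
--     current_start = highlights[0][0]
--     current_texts = [highlights[0][1]]
--     prev_time = highlights[0][0]
--
--     for i in range(1, len(highlights)):
--         start, text = highlights[i]
--
--         # If gap is small, merge with current group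
--         if start - prev_time <= gap_threshold:
--             current_texts.append(text)
--         else:
--             # Save current group and start new one
--             merged.append((current_start, prev_time, ' '.join(current_texts)))
--             current_start = start
--             current_texts = [text]
--
--         prev_time = start
--
--     # Don't forget the last group
--     merged.append((current_start, prev_time, ' '.join(current_texts)))
--
--     return merged
-- ===== SOURCE B (Python) =====
-- def merge_consecutive_highlights(highlights: list, gap_threshold: int = 10) -> list:
--     """Scan back-to-front: each highlight either absorbs into the group that
--     follows it (small gap) or opens a new group; reverse at the end."""
--     rev = []  # merged groups, latest-in-time group last-but-built backwards
--     for t, text in reversed(highlights):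
--         if rev and rev[-1][0] - t <= gap_threshold:
--             s, e, txt = rev[-1]
--             rev[-1] = (t, e, text + ' ' + txt)
--         else:
--             rev.append((t, t, text))
--     rev.reverse()
--     return rev
-- ===== Notes on version B (the rewrite author's own statement) =====
-- stated objective: alternative
-- what changed: B scans the highlights back-to-front, absorbing each highlight into the already-merged group that follows it or opening a new group, then reverses the result, instead of A's forward scan with a (merged, current_start, current_texts, prev_time) accumulator and a final flush.
import Mathlib
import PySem

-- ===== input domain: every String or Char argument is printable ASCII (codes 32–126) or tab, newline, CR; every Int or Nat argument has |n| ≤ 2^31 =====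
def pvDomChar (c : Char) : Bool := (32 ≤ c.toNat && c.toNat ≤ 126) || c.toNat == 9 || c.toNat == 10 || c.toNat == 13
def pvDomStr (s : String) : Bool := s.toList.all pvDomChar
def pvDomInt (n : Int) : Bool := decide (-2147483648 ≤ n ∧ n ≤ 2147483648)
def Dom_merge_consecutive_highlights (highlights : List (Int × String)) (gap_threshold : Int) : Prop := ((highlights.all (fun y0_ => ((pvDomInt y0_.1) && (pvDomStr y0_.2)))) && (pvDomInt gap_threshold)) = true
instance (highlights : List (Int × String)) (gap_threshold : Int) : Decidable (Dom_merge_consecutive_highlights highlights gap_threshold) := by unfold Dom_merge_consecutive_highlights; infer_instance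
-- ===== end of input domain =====

-- B replaces A's forward scan with a four-variable accumulator by a BACKWARD scan that
-- absorbs each highlight into the already-merged group after it (or opens a new group)
-- and reverses at the end; objective: alternative (same O(n) cost, reversed traversal).

-- ===== PORT A =====
-- A's loop state: (merged, current_start, current_texts, prev_time)
def mchA_step (gap_threshold : Int)
    (st : List (Int × Int × String) × Int × List String × Int)
    (x : Int × String) : List (Int × Int × String) × Int × List String × Int :=
  let (merged, current_start, current_texts, prev_time) := st
  if x.1 - prev_time ≤ gap_threshold then
    (merged, current_start, current_texts ++ [x.2], x.1)
  else
    (merged ++ [(current_start, prev_time, PySem.Str.join " " current_texts)], x.1, [x.2], x.1)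

def merge_consecutive_highlights (highlights : List (Int × String)) (gap_threshold : Int) : List (Int × Int × String) :=
  match highlights with
  | [] => []
  | h :: rest =>
    let (merged, current_start, current_texts, prev_time) :=
      rest.foldl (mchA_step gap_threshold) ([], h.1, [h.2], h.1)
    merged ++ [(current_start, prev_time, PySem.Str.join " " current_texts)]

-- ===== PORT B =====
-- B's loop over reversed(highlights): rev[-1] is the group built most recently
-- (earliest in time among the finished groups); x either replaces it (absorb) or appends.
def mchB_rstep (gap_threshold : Int)
    (rev : List (Int × Int × String)) (x : Int × String) : List (Int × Int × String) :=
  match rev.getLast? with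
  | some (s, e, txt) =>
    if s - x.1 ≤ gap_threshold then rev.dropLast ++ [(x.1, e, x.2 ++ " " ++ txt)]
    else rev ++ [(x.1, x.1, x.2)]
  | none => [(x.1, x.1, x.2)]

def merge_consecutive_highlights_alt (highlights : List (Int × String)) (gap_threshold : Int) : List (Int × Int × String) :=
  (highlights.reverse.foldl (mchB_rstep gap_threshold) []).reverse

-- ===== PRECONDITION & SPEC =====
def Spec_merge_consecutive_highlights (highlights : List (Int × String)) (gap_threshold : Int) (out : List (Int × Int × String)) : Prop := out = merge_consecutive_highlights_alt highlights gap_threshold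
instance (highlights : List (Int × String)) (gap_threshold : Int) (out : List (Int × Int × String)) : Decidable (Spec_merge_consecutive_highlights highlights gap_threshold out) := by unfold Spec_merge_consecutive_highlights; infer_instance

-- ===== CLAIM (what is proved, stated in full; the proofs are below) =====
def Claim_equal_merge_consecutive_highlights : Prop := ∀ (highlights : List (Int × String)) (gap_threshold : Int), Dom_merge_consecutive_highlights highlights gap_threshold → Spec_merge_consecutive_highlights highlights gap_threshold (merge_consecutive_highlights highlights gap_threshold)

-- ===== LEMMAS AND PROOFS =====

-- string facts
theorem mch_toList_inj (a b : String) (h : a.toList = b.toList) : a = b := by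
  have := congrArg String.ofList h
  simpa using this

theorem mch_cjoin (s : List Char) (l : List (List Char)) :
    ∀ a x, PySem.Chars.join s ((a :: l) ++ [x]) = PySem.Chars.join s (a :: l) ++ s ++ x := by
  induction l with
  | nil => intro a x; simp [PySem.Chars.join_singleton, PySem.Chars.join_cons_cons]
  | cons b t ih =>
    intro a x
    simp only [List.cons_append, PySem.Chars.join_cons_cons]
    rw [← List.cons_append, ih]
    simp

theorem mch_join_concat (ts : List String) (a x : String) :
    PySem.Str.join " " ((a :: ts) ++ [x]) = PySem.Str.join " " (a :: ts) ++ " " ++ x := by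
  apply mch_toList_inj
  simpa [PySem.Str.join] using mch_cjoin [' '] (ts.map String.toList) a.toList x.toList

theorem mch_join_single (x : String) : PySem.Str.join " " [x] = x := by
  apply mch_toList_inj
  simp [PySem.Str.join, PySem.Chars.join_singleton]

theorem mch_str_assoc (a b c : String) : (a ++ b) ++ c = a ++ (b ++ c) := by
  apply mch_toList_inj; simp

-- B's one step, seen on the reversed (output-order) list
def mch_g (gap : Int) (x : Int × String) (out : List (Int × Int × String)) : List (Int × Int × String) :=
  match out with
  | [] => [(x.1, x.1, x.2)]
  | (s, e, txt) :: tl =>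
    if s - x.1 ≤ gap then (x.1, e, x.2 ++ " " ++ txt) :: tl
    else (x.1, x.1, x.2) :: (s, e, txt) :: tl

theorem mch_rstep_rev (gap : Int) (out : List (Int × Int × String)) (x : Int × String) :
    mchB_rstep gap out.reverse x = (mch_g gap x out).reverse := by
  cases out with
  | nil => rfl
  | cons h tl =>
    obtain ⟨s, e, txt⟩ := h
    simp only [mchB_rstep, mch_g, List.reverse_cons, List.getLast?_concat, List.dropLast_concat]
    split_ifs <;> simp

theorem mch_altB (hs : List (Int × String)) (gap : Int) :
    merge_consecutive_highlights_alt hs gap = hs.foldr (mch_g gap) [] := by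
  unfold merge_consecutive_highlights_alt
  rw [List.foldl_reverse]
  induction hs with
  | nil => rfl
  | cons h t ih =>
    simp only [List.foldr_cons]
    have h1 : t.foldr (fun x y => mchB_rstep gap y x) [] = (t.foldr (mch_g gap) []).reverse := by
      rw [← ih]; simp
    rw [h1, mch_rstep_rev]
    simp

-- the tail of A's run from a mid-loop state, as a recursion
def mch_finish (gap : Int) : Int → List String → Int → List (Int × String) → List (Int × Int × String)
  | cs, ts, pt, [] => [(cs, pt, PySem.Str.join " " ts)]
  | cs, ts, pt, (t, x) :: r =>
    if t - pt ≤ gap then mch_finish gap cs (ts ++ [x]) t r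
    else (cs, pt, PySem.Str.join " " ts) :: mch_finish gap t [x] t r

theorem mch_foldA_finish (gap : Int) (r : List (Int × String)) :
    ∀ (m : List (Int × Int × String)) (cs : Int) (ts : List String) (pt : Int),
    (r.foldl (mchA_step gap) (m, cs, ts, pt)).1
      ++ [((r.foldl (mchA_step gap) (m, cs, ts, pt)).2.1,
           (r.foldl (mchA_step gap) (m, cs, ts, pt)).2.2.2,
           PySem.Str.join " " (r.foldl (mchA_step gap) (m, cs, ts, pt)).2.2.1)]
      = m ++ mch_finish gap cs ts pt r := by
  induction r with
  | nil => intro m cs ts pt; simp [mch_finish]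
  | cons p r' ih =>
    intro m cs ts pt
    obtain ⟨t, x⟩ := p
    simp only [List.foldl_cons, mchA_step, mch_finish]
    by_cases h : t - pt ≤ gap
    · simp only [h, if_pos]
      exact ih m cs (ts ++ [x]) t
    · simp only [h, if_neg, not_false_iff]
      rw [ih (m ++ [(cs, pt, PySem.Str.join " " ts)]) t [x] t]
      simp

-- merging a pending group (cs, a :: ts, pt) into an already-merged suffix
def mch_absorb (gap : Int) (cs : Int) (ts : List String) (pt : Int)
    (out : List (Int × Int × String)) : List (Int × Int × String) :=
  match out with
  | [] => [(cs, pt, PySem.Str.join " " ts)]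
  | (s, e, txt) :: tl =>
    if s - pt ≤ gap then (cs, e, PySem.Str.join " " ts ++ " " ++ txt) :: tl
    else (cs, pt, PySem.Str.join " " ts) :: (s, e, txt) :: tl

theorem mch_absorb_single (gap : Int) (t : Int) (x : String) (out : List (Int × Int × String)) :
    mch_absorb gap t [x] t out = mch_g gap (t, x) out := by
  cases out with
  | nil => simp [mch_absorb, mch_g, mch_join_single]
  | cons h tl =>
    obtain ⟨s, e, txt⟩ := h
    simp [mch_absorb, mch_g, mch_join_single]

theorem mch_finish_absorb (gap : Int) (r : List (Int × String)) :
    ∀ (cs : Int) (a : Int × String) (ts : List String) (pt : Int),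
    mch_finish gap cs (a.2 :: ts) pt r
      = mch_absorb gap cs (a.2 :: ts) pt (r.foldr (mch_g gap) []) := by
  induction r with
  | nil => intro cs a ts pt; rfl
  | cons p r' ih =>
    intro cs a ts pt
    obtain ⟨t, x⟩ := p
    simp only [List.foldr_cons, mch_finish]
    by_cases h : t - pt ≤ gap
    · simp only [h, if_pos]
      rw [show (a.2 :: ts) ++ [x] = a.2 :: (ts ++ [x]) from by simp,
          ih cs a (ts ++ [x]) t]
      -- both sides: absorb the enlarged pending group vs compose the two absorbs
      have jc : PySem.Str.join " " (a.2 :: (ts ++ [x]))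
          = PySem.Str.join " " (a.2 :: ts) ++ " " ++ x := by
        rw [show a.2 :: (ts ++ [x]) = (a.2 :: ts) ++ [x] from by simp]
        exact mch_join_concat ts a.2 x
      cases hout : r'.foldr (mch_g gap) [] with
      | nil =>
        simp [mch_absorb, mch_g, h, jc]
      | cons q tl =>
        obtain ⟨s, e, txt⟩ := q
        by_cases h2 : s - t ≤ gap
        · simp [mch_absorb, mch_g, h, h2, jc, mch_str_assoc]
        · simp [mch_absorb, mch_g, h, h2, jc]
    · simp only [h, if_neg, not_false_iff]
      rw [show (x :: ([] : List String)) = (t, x).2 :: [] from rfl, ih t (t, x) [] t,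
          mch_absorb_single]
      cases hout : r'.foldr (mch_g gap) [] with
      | nil => simp [mch_absorb, mch_g, h]
      | cons q tl =>
        obtain ⟨s, e, txt⟩ := q
        simp only [mch_g, mch_absorb]
        split_ifs <;> simp_all [mch_absorb]

-- ===== VERDICT (by name: the statement is the Claim_ definition above) =====
theorem merge_consecutive_highlights_spec : Claim_equal_merge_consecutive_highlights := by
  intro highlights gap _
  unfold Spec_merge_consecutive_highlights
  rw [mch_altB]
  cases highlights with
  | nil => rfl
  | cons h rest =>
    simp only [merge_consecutive_highlights, List.foldr_cons]
    have := mch_foldA_finish gap rest [] h.1 [h.2] h.1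
    simp only [List.nil_append] at this
    rw [this, show ([h.2] : List String) = h.2 :: [] from rfl,
        mch_finish_absorb gap rest h.1 h [] h.1, mch_absorb_single]
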